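-- pv_equiv track=rewrite | github.com/coolguazitech/network-dashboard | app/indicators/version.py | _match_expectations
-- ===== SOURCE A (Python) =====
-- def _match_expectations(
--     expected_substrings: list[str],
--     actual_packages: list[str],
-- ) -> tuple[bool, list[str]]:
--     """檢查每個期望子字串是否為某個實際 package 的 substring。
--
--     Returns:
--         (all_matched, list_of_unmatched_substrings)
--     """
--     unmatched: list[str] = []
--     for exp in expected_substrings:
--         found = any(exp in pkg for pkg in actual_packages)
--         if not found:
--             unmatched.append(exp)
--     return len(unmatched) == 0, unmatched
-- ===== SOURCE B (Python) =====
-- def _match_expectations(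
--     expected_substrings: list[str],
--     actual_packages: list[str],
-- ) -> tuple[bool, list[str]]:
--     # Loop over packages instead of expectations: keep the still-unmatched
--     # expectations and strike out those found in each package, stopping early
--     # once everything has matched.
--     remaining = list(expected_substrings)
--     for pkg in actual_packages:
--         remaining = [e for e in remaining if e not in pkg]
--         if not remaining:
--             break
--     return (not remaining, remaining)
-- ===== Notes on version B (the rewrite author's own statement) =====
-- stated objective: alternative
-- what changed: B inverts the loop nesting: it iterates over packages, filtering the shrinking list of still-unmatched expectations and breaking early when none remain, instead of scanning all packages for each expectation.
import Mathlib
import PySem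

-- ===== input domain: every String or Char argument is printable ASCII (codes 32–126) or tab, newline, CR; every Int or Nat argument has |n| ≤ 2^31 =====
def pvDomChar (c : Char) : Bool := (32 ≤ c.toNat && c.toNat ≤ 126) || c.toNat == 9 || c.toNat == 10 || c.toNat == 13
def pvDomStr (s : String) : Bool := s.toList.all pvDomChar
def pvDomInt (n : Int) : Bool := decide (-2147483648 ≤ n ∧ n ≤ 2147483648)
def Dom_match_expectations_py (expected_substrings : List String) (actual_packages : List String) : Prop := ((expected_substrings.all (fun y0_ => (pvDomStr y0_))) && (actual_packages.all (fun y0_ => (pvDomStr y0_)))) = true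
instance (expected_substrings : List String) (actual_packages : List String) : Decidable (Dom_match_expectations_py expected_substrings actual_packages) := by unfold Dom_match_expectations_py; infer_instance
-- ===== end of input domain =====

-- B inverts the loop nesting (iterate over packages, filtering the still-unmatched
-- expectations, with an early break); proved to return exactly A's value. Objective: alternative.


-- ===== PORT A =====
def match_expectations_py (expected_substrings : List String) (actual_packages : List String) : Bool × List String :=
  let unmatched : List String :=
    expected_substrings.foldl (fun unmatched exp =>
      let found := actual_packages.any (fun pkg => PySem.Str.isIn exp pkg)
      if !found then unmatched ++ [exp] else unmatched) []
  (decide (unmatched.length = 0), unmatched)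

-- ===== PORT B =====
-- the 'for pkg in actual_packages: … break' loop of Source B
def pvAltLoop (remaining : List String) (pkgs : List String) : List String :=
  match pkgs with
  | [] => remaining
  | pkg :: rest =>
    let remaining' := remaining.filter (fun e => !PySem.Str.isIn e pkg)
    if remaining'.isEmpty then remaining' else pvAltLoop remaining' rest

def match_expectations_py_alt (expected_substrings : List String) (actual_packages : List String) : Bool × List String :=
  let remaining := pvAltLoop expected_substrings actual_packages
  (remaining.isEmpty, remaining)

-- ===== PRECONDITION & SPEC =====
def Spec_match_expectations_py (expected_substrings : List String) (actual_packages : List String) (out : Bool × List String) : Prop := out = match_expectations_py_alt expected_substrings actual_packages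
instance (expected_substrings : List String) (actual_packages : List String) (out : Bool × List String) : Decidable (Spec_match_expectations_py expected_substrings actual_packages out) := by unfold Spec_match_expectations_py; infer_instance

-- ===== CLAIM (what is proved, stated in full; the proofs are below) =====
def Claim_equal_match_expectations_py : Prop := ∀ (expected_substrings : List String) (actual_packages : List String), Dom_match_expectations_py expected_substrings actual_packages → Spec_match_expectations_py expected_substrings actual_packages (match_expectations_py expected_substrings actual_packages)

-- ===== LEMMAS AND PROOFS =====

-- B's package loop computes the filter by the conjunction of all per-package tests.
theorem pvAltLoop_eq_filter (pkgs : List String) (rem : List String) :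
    pvAltLoop rem pkgs = rem.filter (fun e => pkgs.all (fun p => !PySem.Str.isIn e p)) := by
  induction pkgs generalizing rem with
  | nil => simp [pvAltLoop]
  | cons pkg rest ih =>
    have hsplit : rem.filter (fun e => (pkg :: rest).all (fun p => !PySem.Str.isIn e p))
        = (rem.filter (fun e => !PySem.Str.isIn e pkg)).filter
            (fun e => rest.all (fun p => !PySem.Str.isIn e p)) := by
      rw [List.filter_filter]
      apply List.filter_congr
      intro e _
      rw [List.all_cons, Bool.and_comm]
    have hdef : pvAltLoop rem (pkg :: rest)
        = (if (rem.filter (fun e => !PySem.Str.isIn e pkg)).isEmpty then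
             rem.filter (fun e => !PySem.Str.isIn e pkg)
           else pvAltLoop (rem.filter (fun e => !PySem.Str.isIn e pkg)) rest) := rfl
    rw [hdef, hsplit, ih]
    by_cases h : (rem.filter (fun e => !PySem.Str.isIn e pkg)).isEmpty
    · rw [if_pos h, List.isEmpty_iff.mp h, List.filter_nil]
    · rw [if_neg h]

-- !any = all-not, pointwise.
theorem pv_not_any (pkgs : List String) (e : String) :
    (!pkgs.any (fun p => PySem.Str.isIn e p)) = pkgs.all (fun p => !PySem.Str.isIn e p) := by
  induction pkgs with
  | nil => rfl
  | cons p rest ih => rw [List.any_cons, List.all_cons, Bool.not_or, ih]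

-- ===== VERDICT (by name: the statement is the Claim_ definition above) =====
theorem match_expectations_py_spec : Claim_equal_match_expectations_py := by
  intro exp pkgs _
  unfold Spec_match_expectations_py match_expectations_py match_expectations_py_alt
  rw [pvAltLoop_eq_filter]
  have hfold : exp.foldl (fun unmatched e =>
      let found := pkgs.any (fun p => PySem.Str.isIn e p)
      if !found then unmatched ++ [e] else unmatched) []
      = exp.filter (fun e => pkgs.all (fun p => !PySem.Str.isIn e p)) := by
    rw [← List.nil_append (exp.filter (fun e => pkgs.all (fun p => !PySem.Str.isIn e p))),
        ← PySem.List.foldl_append_if_eq_filter]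
    apply PySem.List.foldl_congr_mem
    intro acc e _
    show (if (!pkgs.any fun p => PySem.Str.isIn e p) = true then acc ++ [e] else acc) = _
    rw [pv_not_any]
  rw [hfold]
  cases exp.filter (fun e => pkgs.all (fun p => !PySem.Str.isIn e p)) <;> simp
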